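-- pv_equiv track=rewrite | github.com/Devn913/GFG_Solutions | Difficulty: Easy/Segregate 0s and 1s/segregate-0s-and-1s.py | segregate0and1
-- ===== SOURCE A (Python) =====
-- def segregate0and1(arr):
--     # code here
--     left = []
--     right = []
--     for i in range(len(arr)):
--         if(arr[i] == 0):
--             left.append(arr[i])
--         else:
--             right.append(arr[i])
--
--     index = 0
--
--
--
--     for i in range(len(left)):
--         arr[index] = left[i]
--         index+=1
--
--     for i in range(len(right)):
--         arr[index] = right[i]
--         index+=1
--
--     return arr
-- ===== SOURCE B (Python) =====
-- def segregate0and1(arr):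
--     arr.sort(key=lambda x: x != 0)
--     return arr
-- ===== Notes on version B (the rewrite author's own statement) =====
-- stated objective: idiomatic
-- what changed: Replaces the manual two-list partition plus element-by-element write-back with a single stable sort keyed on the zero/non-zero predicate (zeros sort first, non-zeros keep their relative order).
import Mathlib
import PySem

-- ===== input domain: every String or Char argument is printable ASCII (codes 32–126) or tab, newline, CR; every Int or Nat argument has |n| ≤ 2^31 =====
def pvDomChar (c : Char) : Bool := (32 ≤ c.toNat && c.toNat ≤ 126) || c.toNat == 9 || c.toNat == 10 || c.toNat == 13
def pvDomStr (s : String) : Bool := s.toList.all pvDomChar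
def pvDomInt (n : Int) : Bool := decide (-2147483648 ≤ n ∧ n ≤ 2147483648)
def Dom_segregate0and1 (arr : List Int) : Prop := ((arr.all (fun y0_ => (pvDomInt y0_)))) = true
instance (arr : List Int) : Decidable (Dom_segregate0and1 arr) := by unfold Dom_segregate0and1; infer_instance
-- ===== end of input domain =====

-- B replaces A's manual two-list partition + write-back with one stable sort keyed on the
-- zero/non-zero predicate (idiomatic, not faster). Both A and B mutate arr in place in
-- Python; the equivalence proved here is about the returned value.

-- ===== PORT A =====
def segregate0and1 (arr : List Int) : List Int :=
  -- left/right built in one pass over range(len(arr))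
  let lr := (PySem.List.pyRange 0 (PySem.List.len arr) 1).foldl
    (fun (lr : List Int × List Int) i =>
      if PySem.List.pyGetD arr i 0 == 0 then (lr.1 ++ [PySem.List.pyGetD arr i 0], lr.2)
      else (lr.1, lr.2 ++ [PySem.List.pyGetD arr i 0])) ([], [])
  -- arr[index] = left[i]; index += 1
  let st1 := (PySem.List.pyRange 0 (PySem.List.len lr.1) 1).foldl
    (fun (s : List Int × Int) i => (PySem.List.pySetD s.1 s.2 (PySem.List.pyGetD lr.1 i 0), s.2 + 1)) (arr, 0)
  -- arr[index] = right[i]; index += 1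
  let st2 := (PySem.List.pyRange 0 (PySem.List.len lr.2) 1).foldl
    (fun (s : List Int × Int) i => (PySem.List.pySetD s.1 s.2 (PySem.List.pyGetD lr.2 i 0), s.2 + 1)) st1
  st2.1

-- ===== PORT B =====
-- arr.sort(key=lambda x: x != 0); the Bool key False/True is modelled as Int 0/1 (same order)
def segregate0and1_alt (arr : List Int) : List Int :=
  PySem.List.sorted arr (fun x => if x == 0 then (0 : Int) else 1) false

-- ===== PRECONDITION & SPEC =====
def Spec_segregate0and1 (arr : List Int) (out : List Int) : Prop := out = segregate0and1_alt arr
instance (arr : List Int) (out : List Int) : Decidable (Spec_segregate0and1 arr out) := by unfold Spec_segregate0and1; infer_instance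

-- ===== CLAIM (what is proved, stated in full; the proofs are below) =====
def Claim_equal_segregate0and1 : Prop := ∀ (arr : List Int), Dom_segregate0and1 arr → Spec_segregate0and1 arr (segregate0and1 arr)

-- ===== LEMMAS AND PROOFS =====

theorem partition_foldl (arr l r : List Int) :
    arr.foldl (fun (lr : List Int × List Int) x =>
        if x == 0 then (lr.1 ++ [x], lr.2) else (lr.1, lr.2 ++ [x])) (l, r)
      = (l ++ arr.filter (fun x => x == 0), r ++ arr.filter (fun x => !(x == 0))) := by
  induction arr generalizing l r with
  | nil => simp
  | cons a t ih =>
    cases hc : (a == 0) with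
    | true =>
      rw [List.foldl_cons]
      simp only [hc, if_true]
      rw [ih]
      simp [hc]
    | false =>
      rw [List.foldl_cons]
      simp only [hc, Bool.false_eq_true, if_false]
      rw [ih]
      simp [hc]

theorem writeback_foldl (xs : List Int) :
    ∀ (pre rest : List Int), xs.length ≤ rest.length →
    xs.foldl (fun (s : List Int × Int) v => (PySem.List.pySetD s.1 s.2 v, s.2 + 1))
        (pre ++ rest, (pre.length : Int))
      = (pre ++ xs ++ rest.drop xs.length, (pre.length : Int) + xs.length) := by
  induction xs with
  | nil => intro pre rest _; simp
  | cons x t ih =>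
    intro pre rest hlen
    cases rest with
    | nil => simp at hlen
    | cons r0 rt =>
      have hset : (pre ++ r0 :: rt).set pre.length x = pre ++ x :: rt := by simp
      have h1 : ((pre ++ [x]).length : Int) = (pre.length : Int) + 1 := by simp
      simp only [List.foldl_cons, PySem.List.pySetD_natCast, hset]
      have := ih (pre ++ [x]) rt (by simpa using hlen)
      rw [h1] at this
      simp only [List.append_assoc, List.singleton_append] at this ⊢
      rw [this]
      simp only [List.length_cons, List.drop_succ_cons, Prod.mk.injEq]
      exact ⟨trivial, by push_cast; ring⟩

theorem insertBy_skip {α : Type} (before : α → α → Bool) (x : α) (zs os : List α)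
    (h : ∀ z ∈ zs, before x z = false) :
    PySem.List.insertBy before x (zs ++ os) = zs ++ PySem.List.insertBy before x os := by
  induction zs with
  | nil => simp
  | cons z t ih =>
    have hz : before x z = false := h z (by simp)
    simp [PySem.List.insertBy, hz, ih (fun z hz' => h z (by simp [hz']))]

theorem sorted_foldl_part (arr : List Int) :
    ∀ (zs os : List Int), (∀ z ∈ zs, z = 0) → (∀ o ∈ os, o ≠ 0) →
    arr.foldl (fun acc x =>
        PySem.List.insertBy
          (fun a b => decide ((if a == 0 then (0 : Int) else 1) < (if b == 0 then (0 : Int) else 1)))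
          x acc) (zs ++ os)
      = (zs ++ arr.filter (fun x => x == 0)) ++ (os ++ arr.filter (fun x => !(x == 0))) := by
  induction arr with
  | nil => intro zs os _ _; simp
  | cons a t ih =>
    intro zs os hz ho
    by_cases ha : a = 0
    · have hz' : ∀ z ∈ zs ++ [a], z = 0 := by
        intro z hzm
        rcases List.mem_append.mp hzm with h | h
        · exact hz z h
        · exact (List.mem_singleton.mp h).trans ha
      have hstep : PySem.List.insertBy
          (fun a b => decide ((if a == 0 then (0 : Int) else 1) < (if b == 0 then (0 : Int) else 1)))
          a (zs ++ os) = (zs ++ [a]) ++ os := by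
        rw [insertBy_skip _ _ zs os (fun z hzm => by simp [ha, hz z hzm])]
        cases os with
        | nil => simp [PySem.List.insertBy]
        | cons o ot =>
          have ho' : o ≠ 0 := ho o (by simp)
          simp [PySem.List.insertBy, ha, ho']
      rw [List.foldl_cons, hstep, ih (zs ++ [a]) os hz' ho]
      simp [ha, List.append_assoc]
    · have ho' : ∀ o ∈ os ++ [a], o ≠ 0 := by
        intro o hom
        rcases List.mem_append.mp hom with h | h
        · exact ho o h
        · rw [List.mem_singleton.mp h]; exact ha
      have hstep : PySem.List.insertBy
          (fun a b => decide ((if a == 0 then (0 : Int) else 1) < (if b == 0 then (0 : Int) else 1)))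
          a (zs ++ os) = zs ++ (os ++ [a]) := by
        rw [PySem.List.insertBy_of_forall_not_before]
        · simp
        · intro y _
          simp only [decide_eq_false_iff_not, not_lt]
          by_cases hy : y = 0 <;> simp [ha, hy]
      rw [List.foldl_cons, hstep, ih zs (os ++ [a]) hz ho']
      simp [ha, List.append_assoc]

-- A computes the stable partition: zeros first, then the non-zeros.
theorem segregate0and1_eq_filters (arr : List Int) :
    segregate0and1 arr
      = arr.filter (fun x => x == 0) ++ arr.filter (fun x => !(x == 0)) := by
  unfold segregate0and1
  rw [PySem.List.foldl_pyRange_pyGetD arr 0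
      (f := fun (lr : List Int × List Int) x =>
        if x == 0 then (lr.1 ++ [x], lr.2) else (lr.1, lr.2 ++ [x])) (([], [])) le_rfl]
  simp only [Int.toNat_zero, List.drop_zero]
  rw [partition_foldl]
  simp only [List.nil_append]
  set L := arr.filter (fun x => x == 0) with hL
  set R := arr.filter (fun x => !(x == 0)) with hR
  have hlen : L.length + R.length = arr.length := by
    have := (List.filter_append_perm (fun x => x == 0) arr).length_eq
    simpa [hL, hR] using this
  rw [PySem.List.foldl_pyRange_pyGetD L 0
      (f := fun (s : List Int × Int) v => (PySem.List.pySetD s.1 s.2 v, s.2 + 1)) (arr, 0) le_rfl]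
  simp only [Int.toNat_zero, List.drop_zero]
  have w1 := writeback_foldl L [] arr (by omega)
  simp only [List.nil_append, List.length_nil, Int.natCast_zero, Int.zero_add] at w1
  rw [w1]
  rw [PySem.List.foldl_pyRange_pyGetD R 0
      (f := fun (s : List Int × Int) v => (PySem.List.pySetD s.1 s.2 v, s.2 + 1))
      (L ++ arr.drop L.length, (L.length : Int)) le_rfl]
  simp only [Int.toNat_zero, List.drop_zero]
  have w2 := writeback_foldl R L (arr.drop L.length) (by simp; omega)
  rw [w2]
  have : (arr.drop L.length).drop R.length = [] := by
    apply List.drop_eq_nil_of_le; simp; omega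
  simp [this]

-- B computes the same stable partition.
theorem segregate0and1_alt_eq_filters (arr : List Int) :
    segregate0and1_alt arr
      = arr.filter (fun x => x == 0) ++ arr.filter (fun x => !(x == 0)) := by
  unfold segregate0and1_alt
  rw [PySem.List.sorted_eq_foldl_insertBy]
  have := sorted_foldl_part arr [] [] (by simp) (by simp)
  simpa using this

-- ===== VERDICT (by name: the statement is the Claim_ definition above) =====
theorem segregate0and1_spec : Claim_equal_segregate0and1 := by
  intro arr _
  unfold Spec_segregate0and1
  rw [segregate0and1_eq_filters, segregate0and1_alt_eq_filters]
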